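-- pv_equiv track=rewrite | github.com/lamya-maaou/Ai_Model_For_Lettering | api/api.py | apply_column_mapping
-- ===== SOURCE A (Python) =====
-- def apply_column_mapping(data_list, mapping_dict, operation_type):
--     """Applique le mapping des colonnes et ajoute le type d'opération"""
--     mapped_data = []
--     for item in data_list:
--         item_dict = item.dict() if hasattr(item, 'dict') else item
--         mapped_item = {}
--
--         # Application du mapping
--         for original_col, mapped_col in mapping_dict.items():
--             if original_col in item_dict:
--                 mapped_item[mapped_col] = item_dict[original_col]
--
--         # Ajout du type d'opération
--         if operation_type == "facture":
--             mapped_item['type_operation'] = 'facture'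
--             mapped_item['categorie'] = "divers"
--         elif operation_type == "depense":
--             mapped_item['type_operation'] = 'depense'
--             # La catégorie est déjà mappée si elle existe
--
--         mapped_data.append(mapped_item)
--
--     return mapped_data
-- ===== SOURCE B (Python) =====
-- def apply_column_mapping(data_list, mapping_dict, operation_type):
--     """Column-major re-implementation: outer loop over mapping columns, inner over rows."""
--     dicts = [item.dict() if hasattr(item, 'dict') else item for item in data_list]
--     mapped_data = [{} for _ in dicts]
--     for original_col, mapped_col in mapping_dict.items():
--         for d, m in zip(dicts, mapped_data):
--             if original_col in d:
--                 m[mapped_col] = d[original_col]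
--     if operation_type == "facture":
--         for m in mapped_data:
--             m['type_operation'] = 'facture'
--             m['categorie'] = "divers"
--     elif operation_type == "depense":
--         for m in mapped_data:
--             m['type_operation'] = 'depense'
--     return mapped_data
-- ===== Notes on version B (the rewrite author's own statement) =====
-- stated objective: alternative
-- what changed: B transposes the loops: it builds all rows column-major (outer loop over mapping_dict updating every row's output dict, operation-type fields added in one final pass), instead of A's row-major per-item inner loop over the mapping.
import Mathlib
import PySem

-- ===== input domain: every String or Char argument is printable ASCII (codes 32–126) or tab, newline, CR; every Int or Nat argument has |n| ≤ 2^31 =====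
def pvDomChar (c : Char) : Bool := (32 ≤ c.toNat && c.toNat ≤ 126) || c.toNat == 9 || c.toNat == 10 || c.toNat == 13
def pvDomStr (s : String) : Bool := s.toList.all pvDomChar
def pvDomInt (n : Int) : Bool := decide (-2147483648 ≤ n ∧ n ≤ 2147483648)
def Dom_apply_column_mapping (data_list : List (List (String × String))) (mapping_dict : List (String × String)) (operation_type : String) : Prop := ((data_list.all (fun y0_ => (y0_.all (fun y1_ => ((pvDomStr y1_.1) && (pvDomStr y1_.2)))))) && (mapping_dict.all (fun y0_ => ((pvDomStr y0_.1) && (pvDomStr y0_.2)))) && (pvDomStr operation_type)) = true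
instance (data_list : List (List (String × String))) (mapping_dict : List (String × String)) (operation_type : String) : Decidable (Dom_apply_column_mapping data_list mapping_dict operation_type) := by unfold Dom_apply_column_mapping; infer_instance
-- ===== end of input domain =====

-- ===== PORT A =====
-- A: for each item, map columns via mapping_dict, then add operation-type fields.
def apply_column_mapping (data_list : List (List (String × String))) (mapping_dict : List (String × String)) (operation_type : String) : List (List (String × String)) :=
  data_list.foldl (fun mapped_data item =>
    let item_dict : PySem.Dict String String := ⟨item⟩
    let mapped_item : PySem.Dict String String :=
      mapping_dict.foldl (fun m p =>
        if item_dict.contains p.1 then m.insert p.2 (item_dict.getD p.1 "") else m)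
        PySem.Dict.empty
    let mapped_item :=
      if operation_type = "facture" then
        (mapped_item.insert "type_operation" "facture").insert "categorie" "divers"
      else if operation_type = "depense" then
        mapped_item.insert "type_operation" "depense"
      else mapped_item
    mapped_data ++ [mapped_item.items]) []

-- ===== PORT B =====
-- B (column-major): outer loop over mapping_dict updates every row; operation fields in a final pass.
def apply_column_mapping_alt (data_list : List (List (String × String))) (mapping_dict : List (String × String)) (operation_type : String) : List (List (String × String)) :=
  let dicts : List (PySem.Dict String String) := data_list.map (fun item => ⟨item⟩)
  let pairs : List (PySem.Dict String String × PySem.Dict String String) :=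
    dicts.map (fun d => (d, PySem.Dict.empty))
  let pairs :=
    mapping_dict.foldl (fun st p =>
      st.map (fun dm => if dm.1.contains p.1 then (dm.1, dm.2.insert p.2 (dm.1.getD p.1 "")) else dm))
      pairs
  let ms := pairs.map (·.2)
  let ms :=
    if operation_type = "facture" then
      ms.map (fun m => (m.insert "type_operation" "facture").insert "categorie" "divers")
    else if operation_type = "depense" then
      ms.map (fun m => m.insert "type_operation" "depense")
    else ms
  ms.map (·.items)

-- ===== PRECONDITION & SPEC =====
def Spec_apply_column_mapping (data_list : List (List (String × String))) (mapping_dict : List (String × String)) (operation_type : String) (out : List (List (String × String))) : Prop := out = apply_column_mapping_alt data_list mapping_dict operation_type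
instance (data_list : List (List (String × String))) (mapping_dict : List (String × String)) (operation_type : String) (out : List (List (String × String))) : Decidable (Spec_apply_column_mapping data_list mapping_dict operation_type out) := by unfold Spec_apply_column_mapping; infer_instance

-- ===== CLAIM (what is proved, stated in full; the proofs are below) =====
def Claim_equal_apply_column_mapping : Prop := ∀ (data_list : List (List (String × String))) (mapping_dict : List (String × String)) (operation_type : String), Dom_apply_column_mapping data_list mapping_dict operation_type → Spec_apply_column_mapping data_list mapping_dict operation_type (apply_column_mapping data_list mapping_dict operation_type)

-- ===== LEMMAS AND PROOFS =====

-- a fold that maps the whole state at each step is a per-element fold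
theorem pv_foldl_map_comm {α β : Type} (ms : List β) (g : β → α → α) (init : List α) :
    ms.foldl (fun st p => st.map (g p)) init
      = init.map (fun x => ms.foldl (fun x p => g p x) x) := by
  induction ms generalizing init with
  | nil => simp
  | cons m ms ih =>
    simp only [List.foldl_cons, ih, List.map_map]
    rfl

-- the (source, acc) pair fold keeps the source fixed
theorem pv_pair_fold (ms : List (String × String)) (d m : PySem.Dict String String) :
    ms.foldl (fun (dm : PySem.Dict String String × PySem.Dict String String) p =>
        if dm.1.contains p.1 then (dm.1, dm.2.insert p.2 (dm.1.getD p.1 "")) else dm) (d, m)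
      = (d, ms.foldl (fun m p => if d.contains p.1 then m.insert p.2 (d.getD p.1 "") else m) m) := by
  induction ms generalizing m with
  | nil => rfl
  | cons q ms ih =>
    simp only [List.foldl_cons]
    by_cases h : d.contains q.1 = true <;> simp [h, ih]

-- ===== VERDICT (by name: the statement is the Claim_ definition above) =====
theorem apply_column_mapping_spec : Claim_equal_apply_column_mapping := by
  intro data_list mapping_dict operation_type _
  unfold Spec_apply_column_mapping apply_column_mapping apply_column_mapping_alt
  dsimp only
  rw [PySem.List.foldl_append_singleton_eq_map]
  rw [pv_foldl_map_comm]
  simp only [List.map_map]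
  split_ifs with h1 h2 <;>
    · simp only [List.map_map]
      refine List.map_congr_left (fun item _ => ?_)
      simp only [Function.comp_apply]
      rw [pv_pair_fold]
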